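-- pv_equiv track=rewrite | github.com/MKuranowski/WarsawGTFS | warsaw_gtfs/fix_technical_trips.py | _find_split_index
-- ===== SOURCE A (Python) =====
-- def _find_split_index(stops: list[tuple[int, str, bool]]) -> int | None:
--     if len(stops) < 2: return None
--
--     for i in range(len(stops) - 1):
--         curr_depot = stops[i][2]
--         next_depot = stops[i+1][2]
--
--         # Depot -> Route. Split BEFORE the first route stop.
--         if curr_depot and not next_depot:
--             return i + 1
--
--         # Route -> Depot. Split AT the last route stop.
--         if not curr_depot and next_depot:
--             return i
--
--     return None
-- ===== SOURCE B (Python) =====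
-- def _run_length_encode(stops):
--     """Run-length encoding of the depot-flag sequence: list of (flag, count)."""
--     runs = []
--     for s in stops:
--         f = s[2]
--         if runs and runs[-1][0] == f:
--             runs[-1] = (f, runs[-1][1] + 1)
--         else:
--             runs.append((f, 1))
--     return runs
--
--
-- def _find_split_index(stops: "list[tuple[int, str, bool]]") -> "int | None":
--     # Stage 1: compress the flag sequence into runs.  Stage 2: the split exists
--     # iff there are at least two runs, and sits at the first run's boundary.
--     runs = _run_length_encode(stops)
--     if len(runs) < 2:
--         return None
--     first, c = runs[0]
--     return c if first else c - 1
-- ===== Notes on version B (the rewrite author's own statement) =====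
-- stated objective: alternative
-- what changed: Replaces A's pairwise adjacent scan with two return branches by a two-stage pass: first build the run-length encoding of the depot-flag sequence, then read the split index off the first run (None when there are fewer than two runs).
import Mathlib
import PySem

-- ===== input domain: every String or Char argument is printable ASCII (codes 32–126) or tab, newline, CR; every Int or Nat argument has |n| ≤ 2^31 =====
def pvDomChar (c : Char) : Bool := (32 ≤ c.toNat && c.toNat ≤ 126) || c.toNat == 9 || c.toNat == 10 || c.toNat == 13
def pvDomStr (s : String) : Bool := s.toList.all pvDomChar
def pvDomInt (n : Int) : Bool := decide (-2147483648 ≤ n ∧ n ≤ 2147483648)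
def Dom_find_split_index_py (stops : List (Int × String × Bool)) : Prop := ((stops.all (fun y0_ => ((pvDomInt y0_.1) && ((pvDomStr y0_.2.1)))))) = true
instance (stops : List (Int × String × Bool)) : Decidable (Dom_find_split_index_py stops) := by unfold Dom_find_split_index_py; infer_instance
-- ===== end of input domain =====

-- B replaces A's pairwise adjacent scan by first building the run-length
-- encoding of the depot-flag sequence and then reading the split index off
-- the first run (objective: alternative decomposition, same cost).

-- ===== PORT A =====
-- the 'for i in range(len(stops) - 1)' loop, recursion on the index i
def pvALoop (stops : List (Int × String × Bool)) (i : Nat) : Option Int :=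
  if _h : i < stops.length - 1 then
    let curr := (stops.getD i (0, "", false)).2.2
    let next := (stops.getD (i + 1) (0, "", false)).2.2
    if curr && !next then some ((i : Int) + 1)
    else if !curr && next then some (i : Int)
    else pvALoop stops (i + 1)
  else none
termination_by stops.length - i

def find_split_index_py (stops : List (Int × String × Bool)) : Option Int :=
  if stops.length < 2 then none
  else pvALoop stops 0

-- ===== PORT B =====
-- one step of Source B's run-length-encoding loop: increment the last run's
-- count if the flag matches, else append a fresh run
def pvStep (acc : List (Bool × Nat)) (s : Int × String × Bool) : List (Bool × Nat) :=
  match acc.getLast? with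
  | some (f, n) => if f == s.2.2 then acc.dropLast ++ [(f, n + 1)] else acc ++ [(s.2.2, 1)]
  | none => [(s.2.2, 1)]

-- _run_length_encode: the for-loop over stops with the runs accumulator
def pvRLE (stops : List (Int × String × Bool)) : List (Bool × Nat) :=
  stops.foldl pvStep []

def find_split_index_py_alt (stops : List (Int × String × Bool)) : Option Int :=
  let runs := pvRLE stops
  if runs.length < 2 then none
  else
    match runs with
    | (first, c) :: _ => if first then some (c : Int) else some ((c : Int) - 1)
    | [] => none

-- ===== PRECONDITION & SPEC =====
def Spec_find_split_index_py (stops : List (Int × String × Bool)) (out : Option Int) : Prop := out = find_split_index_py_alt stops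
instance (stops : List (Int × String × Bool)) (out : Option Int) : Decidable (Spec_find_split_index_py stops out) := by unfold Spec_find_split_index_py; infer_instance

-- ===== CLAIM (what is proved, stated in full; the proofs are below) =====
def Claim_equal_find_split_index_py : Prop := ∀ (stops : List (Int × String × Bool)), Dom_find_split_index_py stops → Spec_find_split_index_py stops (find_split_index_py stops)

-- ===== LEMMAS AND PROOFS =====

-- length of the leading run of depot-flags equal to f (proof-side measure)
def pvRun (f : Bool) : List (Int × String × Bool) → Nat
  | [] => 0
  | s :: rest => if s.2.2 == f then pvRun f rest + 1 else 0

theorem pvRun_le (f : Bool) (l : List (Int × String × Bool)) : pvRun f l ≤ l.length := by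
  induction l with
  | nil => simp [pvRun]
  | cons s rest ih => simp only [pvRun, List.length_cons]; split_ifs <;> omega

-- pvStep only touches the last element of the accumulator
theorem pvStep_append (p q : List (Bool × Nat)) (hq : q ≠ []) (s : Int × String × Bool) :
    pvStep (p ++ q) s = p ++ pvStep q s := by
  unfold pvStep
  rw [List.getLast?_append_of_ne_nil p hq]
  match hq' : q.getLast? with
  | none => exact absurd (List.getLast?_eq_none_iff.mp hq') hq
  | some (f, n) =>
    simp only
    split_ifs with h
    · rw [List.dropLast_append_of_ne_nil hq, List.append_assoc]
    · rw [List.append_assoc]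

theorem pvStep_ne_nil (acc : List (Bool × Nat)) (s : Int × String × Bool) :
    pvStep acc s ≠ [] := by
  unfold pvStep
  match h : acc.getLast? with
  | none => simp
  | some (f, n) => simp only; split_ifs <;> simp

theorem foldl_pvStep_ne_nil (l : List (Int × String × Bool)) (acc : List (Bool × Nat))
    (h : acc ≠ []) : l.foldl pvStep acc ≠ [] := by
  induction l generalizing acc with
  | nil => exact h
  | cons s rest ih => exact ih _ (pvStep_ne_nil acc s)

theorem foldl_pvStep_split (l : List (Int × String × Bool)) (p q : List (Bool × Nat))
    (hq : q ≠ []) : l.foldl pvStep (p ++ q) = p ++ l.foldl pvStep q := by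
  induction l generalizing q with
  | nil => rfl
  | cons s rest ih =>
    simp only [List.foldl_cons]
    rw [pvStep_append p q hq s]
    exact ih _ (pvStep_ne_nil q s)

-- characterisation of the fold started from a single run (f, n):
-- the head run is (f, n + leading run of f), and there is a second run
-- iff the leading run does not cover all of l
theorem foldl_pvStep_single (l : List (Int × String × Bool)) (f : Bool) (n : Nat) :
    (l.foldl pvStep [(f, n)]).head? = some (f, n + pvRun f l) ∧
    (2 ≤ (l.foldl pvStep [(f, n)]).length ↔ pvRun f l < l.length) := by
  induction l generalizing f n with
  | nil => simp [pvRun]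
  | cons s rest ih =>
    by_cases h : s.2.2 = f
    · have hstep : pvStep [(f, n)] s = [(f, n + 1)] := by
        simp [pvStep, h]
      have hrun : pvRun f (s :: rest) = pvRun f rest + 1 := by
        simp [pvRun, h]
      simp only [List.foldl_cons, hstep, hrun, List.length_cons]
      obtain ⟨ih1, ih2⟩ := ih f (n + 1)
      refine ⟨by rw [ih1]; congr 2; omega, by rw [ih2]; omega⟩
    · have h' : ¬ f = s.2.2 := by intro e; exact h e.symm
      have hstep : pvStep [(f, n)] s = [(f, n)] ++ [(s.2.2, 1)] := by
        simp [pvStep, h']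
      have hrun : pvRun f (s :: rest) = 0 := by
        simp [pvRun, h]
      simp only [List.foldl_cons, hstep, hrun, List.length_cons]
      rw [foldl_pvStep_split rest [(f, n)] [(s.2.2, 1)] (by simp)]
      constructor
      · simp
      · have hne := foldl_pvStep_ne_nil rest [(s.2.2, 1)] (by simp)
        have : 1 ≤ (rest.foldl pvStep [(s.2.2, 1)]).length :=
          List.length_pos_iff.mpr hne
        simp only [List.length_append, List.length_cons, List.length_nil]
        omega

-- shifting A's loop one cons to the right adds 1 to the returned index
theorem pvALoop_cons_succ (x : Int × String × Bool) (l : List (Int × String × Bool)) (i : Nat) :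
    pvALoop (x :: l) (i + 1) = (pvALoop l i).map (· + 1) := by
  have key : ∀ n i, l.length - i ≤ n →
      pvALoop (x :: l) (i + 1) = (pvALoop l i).map (· + 1) := by
    intro n
    induction n with
    | zero =>
      intro i hi
      have h1 : ¬ (i + 1 < (x :: l).length - 1) := by simp [List.length_cons]; omega
      have h2 : ¬ (i < l.length - 1) := by omega
      have A : pvALoop (x :: l) (i + 1) = none := by rw [pvALoop, dif_neg h1]
      have B : pvALoop l i = none := by rw [pvALoop, dif_neg h2]
      rw [A, B]; rfl
    | succ n ih =>
      intro i hi
      by_cases h : i < l.length - 1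
      · have h1 : i + 1 < (x :: l).length - 1 := by simp [List.length_cons]; omega
        conv_lhs => rw [pvALoop]
        conv_rhs => rw [pvALoop]
        simp only [h1, h, dif_pos]
        have g1 : (x :: l).getD (i + 1) (0, "", false) = l.getD i (0, "", false) := by
          simp
        have g2 : (x :: l).getD (i + 1 + 1) (0, "", false) = l.getD (i + 1) (0, "", false) := by
          simp
        rw [g1, g2]
        split_ifs with c1 c2
        · simp only [Option.map_some, Option.some.injEq]; push_cast; ring
        · simp only [Option.map_some, Option.some.injEq]; push_cast; ring
        · exact ih (i + 1) (by omega)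
      · have h1 : ¬ (i + 1 < (x :: l).length - 1) := by simp [List.length_cons]; omega
        have A : pvALoop (x :: l) (i + 1) = none := by rw [pvALoop, dif_neg h1]
        have B : pvALoop l i = none := by rw [pvALoop, dif_neg h]
        rw [A, B]; rfl
  exact key (l.length - i) i le_rfl

theorem pvALoop_two (a b : Int × String × Bool) (r : List (Int × String × Bool)) :
    pvALoop (a :: b :: r) 0 =
      if a.2.2 && !b.2.2 then some 1
      else if !a.2.2 && b.2.2 then some 0
      else (pvALoop (b :: r) 0).map (· + 1) := by
  rw [pvALoop]
  have h : 0 < (a :: b :: r).length - 1 := by simp [List.length_cons]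
  simp only [h, dif_pos, List.getD_cons_zero, List.getD_cons_succ]
  split_ifs with c1 c2 <;> simp [pvALoop_cons_succ]

-- arithmetic run-length reformulation used as a stepping stone: A equals it,
-- and B's RLE fold equals it
def pvArith (stops : List (Int × String × Bool)) : Option Int :=
  match stops with
  | [] => none
  | s :: rest =>
    let first := s.2.2
    let c : Nat := 1 + pvRun first rest
    if c == stops.length then none
    else if first then some (c : Int) else some ((c : Int) - 1)

theorem pvA_eq_arith (stops : List (Int × String × Bool)) :
    find_split_index_py stops = pvArith stops := by
  induction stops with
  | nil => rfl
  | cons a tl ih =>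
    cases tl with
    | nil => rfl
    | cons b r =>
      have hlen : ¬ ((a :: b :: r).length < 2) := by simp [List.length_cons]
      unfold find_split_index_py at ih ⊢
      simp only [hlen, if_neg, if_false]
      rw [pvALoop_two]
      by_cases hab : b.2.2 = a.2.2
      · have c1 : ¬ (a.2.2 && !b.2.2) = true := by simp [hab]
        have c2 : ¬ (!a.2.2 && b.2.2) = true := by simp [hab]
        simp only [c1, c2, if_false, if_neg]
        by_cases hl2 : (b :: r).length < 2
        · match r with
          | [] =>
            cases hA : a.2.2 <;>
              simp [pvArith, pvRun, hab, hA, pvALoop]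
        · simp only [hl2, if_false, if_neg] at ih
          rw [ih]
          show _ = pvArith (a :: b :: r)
          simp only [pvArith, pvRun, hab, beq_self_eq_true, if_pos,
            List.length_cons]
          set k := pvRun a.2.2 r with hk
          by_cases hfull : 1 + (k + 1) = r.length + 1 + 1
          · have hfull' : (1 + k == r.length + 1) = true := by simp; omega
            have hfull2 : (1 + (k + 1) == r.length + 1 + 1) = true := by simp; omega
            simp [hab, hfull', hfull2]
          · have h1 : (1 + k == r.length + 1) = false := by simp; omega
            have h2 : (1 + (k + 1) == r.length + 1 + 1) = false := by simp; omega
            simp only [hab, h1, h2, Bool.false_eq_true, if_false, if_neg]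
            cases hA : a.2.2 <;> simp [Option.map] <;> push_cast <;> ring
      · have hrun : pvRun a.2.2 (b :: r) = 0 := by simp [pvRun, hab]
        have hlen2 : (1 + pvRun a.2.2 (b :: r) == (a :: b :: r).length) = false := by
          simp [hrun, List.length_cons]
        cases hA : a.2.2 <;> cases hB : b.2.2 <;> simp_all [pvArith, pvRun]

theorem pvB_eq_arith (stops : List (Int × String × Bool)) :
    find_split_index_py_alt stops = pvArith stops := by
  match stops with
  | [] => rfl
  | a :: rest =>
    have hfold : pvRLE (a :: rest) = rest.foldl pvStep [(a.2.2, 1)] := by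
      simp [pvRLE, List.foldl_cons, pvStep]
    obtain ⟨hhead, hlen⟩ := foldl_pvStep_single rest a.2.2 1
    have hle := pvRun_le a.2.2 rest
    unfold find_split_index_py_alt pvArith
    simp only [hfold]
    by_cases hfull : pvRun a.2.2 rest < rest.length
    · -- at least two runs on both sides
      have h2 : ¬ ((rest.foldl pvStep [(a.2.2, 1)]).length < 2) := by
        have := hlen.mpr hfull; omega
      have hc : (1 + pvRun a.2.2 rest == (a :: rest).length) = false := by
        simp [List.length_cons]; omega
      simp only [h2, if_neg, if_false, hc, Bool.false_eq_true]
      match hM : rest.foldl pvStep [(a.2.2, 1)] with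
      | [] => simp [hM] at hhead
      | (f, c) :: t =>
        rw [hM] at hhead
        simp only [List.head?_cons, Option.some.injEq, Prod.mk.injEq] at hhead
        obtain ⟨hf, hc'⟩ := hhead
        subst hf; subst hc'; rfl
    · -- single run: both sides return none
      have heq : pvRun a.2.2 rest = rest.length := by omega
      have h2 : (rest.foldl pvStep [(a.2.2, 1)]).length < 2 := by
        by_contra h
        exact hfull (hlen.mp (by omega))
      have hc : (1 + pvRun a.2.2 rest == (a :: rest).length) = true := by
        simp [List.length_cons]; omega
      have heq2 : 1 + pvRun a.2.2 rest = rest.length + 1 := by omega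
      simp [h2, heq2]

-- ===== VERDICT (by name: the statement is the Claim_ definition above) =====
theorem find_split_index_py_spec : Claim_equal_find_split_index_py := by
  intro stops _
  show find_split_index_py stops = find_split_index_py_alt stops
  rw [pvA_eq_arith, pvB_eq_arith]
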